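-- pv_equiv track=rewrite | github.com/mal1kc/moe_bot_auth_server_archive | moe_bot_auth_server/admin_control.py | parse_char_list_to_str_list
-- ===== SOURCE A (Python) =====
-- def parse_char_list_to_str_list(char_list: list[str] | str) -> list[str]:
--     # example chr_list : "[" "'" "l" "o" "g" ... "'" , "'" ... "l" "'" , "]"
--     sentence_seprated_char_list = []
--     str_list = []
--     for char in char_list:
--         if char == "'" or char == "[":
--             continue
--         elif char == ",":
--             str_list.append("".join(sentence_seprated_char_list))
--             sentence_seprated_char_list.clear()
--         elif char == "]":
--             str_list.append("".join(sentence_seprated_char_list))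
--             sentence_seprated_char_list.clear()
--         else:
--             sentence_seprated_char_list.append(char)
--     return str_list
-- ===== SOURCE B (Python) =====
-- def parse_char_list_to_str_list(char_list: list[str] | str) -> list[str]:
--     # Filter once, index the delimiters, then emit segments by slicing.
--     filtered = [c for c in char_list if c != "'" and c != "["]
--     delims = [i for i, c in enumerate(filtered) if c == "," or c == "]"]
--     result = []
--     start = 0
--     for d in delims:
--         result.append("".join(filtered[start:d]))
--         start = d + 1
--     return result
-- ===== Notes on version B (the rewrite author's own statement) =====
-- stated objective: alternative
-- what changed: Replaces the buffer-accumulate-and-flush scan with filter + delimiter-index table + slicing between consecutive delimiter indices.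
import Mathlib
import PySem

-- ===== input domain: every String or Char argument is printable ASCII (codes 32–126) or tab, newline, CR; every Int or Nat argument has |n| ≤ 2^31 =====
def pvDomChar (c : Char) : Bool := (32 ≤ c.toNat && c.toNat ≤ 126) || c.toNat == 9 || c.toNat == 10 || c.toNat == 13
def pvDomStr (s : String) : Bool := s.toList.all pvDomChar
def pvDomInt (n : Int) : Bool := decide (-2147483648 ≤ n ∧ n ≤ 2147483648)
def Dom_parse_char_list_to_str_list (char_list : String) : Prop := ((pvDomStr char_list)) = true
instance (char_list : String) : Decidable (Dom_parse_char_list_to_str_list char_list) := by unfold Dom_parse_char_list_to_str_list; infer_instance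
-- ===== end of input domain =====

-- B replaces A's buffer-accumulate-and-flush scan by filter + delimiter-index table + slicing (alternative decomposition, same cost).


-- ===== PORT A =====
def parse_char_list_to_str_list (char_list : String) : List String :=
  (char_list.toList.foldl (fun (st : List Char × List String) char =>
      if char == '\'' || char == '[' then st
      else if char == ',' then ([], st.2 ++ [String.mk st.1])
      else if char == ']' then ([], st.2 ++ [String.mk st.1])
      else (st.1 ++ [char], st.2)) ([], [])).2

-- ===== PORT B =====
def parse_char_list_to_str_list_alt (char_list : String) : List String :=
  let filtered := char_list.toList.filter (fun c => !(c == '\'') && !(c == '['))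
  let delims := ((PySem.List.enumerate filtered).filter (fun p => p.2 == ',' || p.2 == ']')).map (·.1)
  (delims.foldl (fun (acc : List String × Int) d =>
      (acc.1 ++ [String.mk (PySem.List.slice filtered (some acc.2) (some d))], d + 1)) ([], 0)).1

-- ===== PRECONDITION & SPEC =====
def Spec_parse_char_list_to_str_list (char_list : String) (out : List String) : Prop := out = parse_char_list_to_str_list_alt char_list
instance (char_list : String) (out : List String) : Decidable (Spec_parse_char_list_to_str_list char_list out) := by unfold Spec_parse_char_list_to_str_list; infer_instance

-- ===== CLAIM (what is proved, stated in full; the proofs are below) =====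
def Claim_equal_parse_char_list_to_str_list : Prop := ∀ (char_list : String), Dom_parse_char_list_to_str_list char_list → Spec_parse_char_list_to_str_list char_list (parse_char_list_to_str_list char_list)

-- ===== LEMMAS AND PROOFS =====

-- reference: A's scan with the skip branch
def refA : List Char → List Char → List String
  | _, [] => []
  | buf, c :: cs =>
    if c == '\'' || c == '[' then refA buf cs
    else if c == ',' then String.mk buf :: refA [] cs
    else if c == ']' then String.mk buf :: refA [] cs
    else refA (buf ++ [c]) cs

-- reference: scan over the already-filtered list
def refF : List Char → List Char → List String
  | _, [] => []
  | buf, c :: cs =>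
    if c == ',' || c == ']' then String.mk buf :: refF [] cs
    else refF (buf ++ [c]) cs

-- recursive form of B's segment-emitting fold
def segRec (fl : List Char) : List Int → Int → List String
  | [], _ => []
  | d :: ds, st => String.mk (PySem.List.slice fl (some st) (some d)) :: segRec fl ds (d + 1)

def dIdx (cs : List Char) (s : Int) : List Int :=
  ((PySem.List.enumerate cs s).filter (fun p => p.2 == ',' || p.2 == ']')).map (·.1)

def stepA (st : List Char × List String) (char : Char) : List Char × List String :=
  if char == '\'' || char == '[' then st
  else if char == ',' then ([], st.2 ++ [String.mk st.1])
  else if char == ']' then ([], st.2 ++ [String.mk st.1])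
  else (st.1 ++ [char], st.2)

theorem foldA_eq_refA (cs : List Char) : ∀ buf out,
    (cs.foldl stepA (buf, out)).2 = out ++ refA buf cs := by
  induction cs with
  | nil => intro buf out; simp [refA]
  | cons c cs ih =>
    intro buf out
    rw [List.foldl_cons]
    by_cases h1 : (c == '\'' || c == '[') = true
    · have hs : stepA (buf, out) c = (buf, out) := by simp [stepA, h1]
      have hr : refA buf (c :: cs) = refA buf cs := by simp [refA, h1]
      rw [hs, hr]; exact ih buf out
    · by_cases h2 : (c == ',') = true
      · have hs : stepA (buf, out) c = ([], out ++ [String.mk buf]) := by simp [stepA, h1, h2]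
        have hr : refA buf (c :: cs) = String.mk buf :: refA [] cs := by simp [refA, h1, h2]
        rw [hs, hr, ih]; simp
      · by_cases h3 : (c == ']') = true
        · have hs : stepA (buf, out) c = ([], out ++ [String.mk buf]) := by simp [stepA, h1, h2, h3]
          have hr : refA buf (c :: cs) = String.mk buf :: refA [] cs := by simp [refA, h1, h2, h3]
          rw [hs, hr, ih]; simp
        · have hs : stepA (buf, out) c = (buf ++ [c], out) := by simp [stepA, h1, h2, h3]
          have hr : refA buf (c :: cs) = refA (buf ++ [c]) cs := by simp [refA, h1, h2, h3]
          rw [hs, hr]; exact ih (buf ++ [c]) out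

theorem refA_eq_refF (cs : List Char) : ∀ buf,
    refA buf cs = refF buf (cs.filter (fun c => !(c == '\'') && !(c == '['))) := by
  induction cs with
  | nil => intro buf; simp [refA, refF]
  | cons c cs ih =>
    intro buf
    by_cases h1 : (c == '\'' || c == '[') = true
    · have : (!(c == '\'') && !(c == '[')) = false := by
        rcases Bool.or_eq_true_iff.mp h1 with h | h <;> simp [h]
      simp [refA, h1, List.filter_cons, this, ih]
    · have hk : (!(c == '\'') && !(c == '[')) = true := by
        simp only [Bool.or_eq_true] at h1; push_neg at h1
        simp [h1.1, h1.2]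
      by_cases h2 : (c == ',') = true
      · simp [refA, refF, h1, h2, List.filter_cons, hk, ih]
      · by_cases h3 : (c == ']') = true
        · simp [refA, refF, h1, h2, h3, List.filter_cons, hk, ih]
        · simp [refA, refF, h1, h2, h3, List.filter_cons, hk, ih]

theorem foldB_eq_segRec (fl : List Char) (ds : List Int) : ∀ acc st,
    (ds.foldl (fun (acc : List String × Int) d =>
      (acc.1 ++ [String.mk (PySem.List.slice fl (some acc.2) (some d))], d + 1)) (acc, st)).1
    = acc ++ segRec fl ds st := by
  induction ds with
  | nil => intro acc st; simp [segRec]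
  | cons d ds ih => intro acc st; simp [List.foldl_cons, segRec, ih]

theorem dIdx_cons (c : Char) (cs : List Char) (s : Int) :
    dIdx (c :: cs) s = if (c == ',' || c == ']') = true then s :: dIdx cs (s + 1) else dIdx cs (s + 1) := by
  by_cases h : (c == ',' || c == ']') = true <;>
    simp [dIdx, PySem.List.enumerate_cons, List.filter_cons, h]

theorem segRec_dIdx (cs : List Char) : ∀ (pre buf : List Char),
    segRec (pre ++ buf ++ cs) (dIdx cs ((pre.length : Int) + (buf.length : Int))) (pre.length : Int)
    = refF buf cs := by
  induction cs with
  | nil => intro pre buf; simp [dIdx, PySem.List.enumerate_nil, segRec, refF]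
  | cons c cs ih =>
    intro pre buf
    rw [dIdx_cons]
    by_cases h : (c == ',' || c == ']') = true
    · simp only [h, if_true]
      rw [segRec]
      have hslice : PySem.List.slice (pre ++ buf ++ c :: cs) (some (pre.length : Int))
          (some ((pre.length : Int) + (buf.length : Int))) = buf := by
        have : ((pre.length : Int) + (buf.length : Int)) = ((pre.length + buf.length : Nat) : Int) := by
          push_cast; ring
        rw [this, PySem.List.slice_natCast]
        simp [List.append_assoc]
      rw [hslice, refF, if_pos h]
      congr 1
      have h1 : (pre.length : Int) + (buf.length : Int) + 1
          = (((pre ++ buf ++ [c]).length : Nat) : Int) := by push_cast; simp; ring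
      have h2 : pre ++ buf ++ c :: cs = (pre ++ buf ++ [c]) ++ ([] : List Char) ++ cs := by simp
      rw [h1, h2]
      have := ih (pre ++ buf ++ [c]) []
      simpa using this
    · simp only [h, if_false]
      rw [refF, if_neg h]
      have h1 : (pre.length : Int) + (buf.length : Int) + 1
          = (pre.length : Int) + (((buf ++ [c]).length : Nat) : Int) := by push_cast; simp; ring
      have h2 : pre ++ buf ++ c :: cs = pre ++ (buf ++ [c]) ++ cs := by simp
      rw [h1, h2]
      exact ih pre (buf ++ [c])

-- ===== VERDICT (by name: the statement is the Claim_ definition above) =====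
theorem parse_char_list_to_str_list_spec : Claim_equal_parse_char_list_to_str_list := by
  intro s _
  show parse_char_list_to_str_list s = parse_char_list_to_str_list_alt s
  have hA : parse_char_list_to_str_list s = (s.toList.foldl stepA ([], [])).2 := rfl
  rw [hA, foldA_eq_refA, refA_eq_refF]
  unfold parse_char_list_to_str_list_alt
  rw [foldB_eq_segRec]
  have := segRec_dIdx (s.toList.filter (fun c => !(c == '\'') && !(c == '['))) [] []
  simpa [dIdx] using this.symm
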